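-- pv_equiv track=rewrite | github.com/victormarti11/ALCP | Entrega_1/entrega1.py | number2word
-- ===== SOURCE A (Python) =====
-- def number2word(p,n):
--     word = ''
--     num = p - 1                                     # Ajustamos el número porque lo necesitamos para el correcto funcionamiento del algoritmo.
--     k = n
--     while k > 1:
--           num_pal_let = 0
--           for i in range(1,k+1):
--               num_pal_let += 26**(i-1)              # Número total de palabras que empiezan por cualquiera de las 26 letras y de longitud desde 1 hasta k.
--
--           if num%num_pal_let == 0:                  # Si p-1 es divisible entre num_pal_let previamente definido
--              word += chr((num//num_pal_let)+97)     # entonces a la palabra se le añade la letra que toca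
--              break                                  # y se acaba el proceso.
--
--           word += chr((num//num_pal_let)+97)        # Concatenación de letras transformando la división entera de num y num_pal_let a unicode.
--           num = num%num_pal_let - 1                 # Restamos 1 al resto para el correcto funcionamiento del algoritmo en la siguiente iteración del bucle.
--           k -= 1
--     if k == 1:                                      # Caso base: palabras de longitud 1.
--        word += chr(num+97)
--     return word
-- ===== SOURCE B (Python) =====
-- def number2word(p, n):
--     # O(n): the per-letter block size sum(26**i for i in range(k)) = (26**k-1)//25
--     # is computed once in closed form and updated incrementally, instead of A's
--     # inner loop that rebuilds it from scratch on every outer iteration.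
--     if n <= 0:
--         return ''
--     out = []
--     num = p - 1
--     s = (26 ** n - 1) // 25          # number of words of length 1..n per first letter
--     k = n
--     while k > 1:
--         q, r = divmod(num, s)
--         out.append(chr(q + 97))
--         if r == 0:
--             return ''.join(out)
--         num = r - 1
--         s = (s - 1) // 26            # block size for length 1..k-1
--         k -= 1
--     out.append(chr(num + 97))
--     return ''.join(out)
-- ===== Notes on version B (the rewrite author's own statement) =====
-- stated objective: faster
-- what changed: A rebuilds the per-letter block size sum(26**i for i in range(k)) with an inner loop on every outer iteration; B computes it once in closed form as (26**n-1)//25 and updates it incrementally via s=(s-1)//26, removing the inner loop entirely.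
-- outside the precondition, e.g. on number2word(2000000, 1): A raises ValueError, B raises ValueError; on number2word(-10000, 1): A raises ValueError, B raises ValueError
import Mathlib
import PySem

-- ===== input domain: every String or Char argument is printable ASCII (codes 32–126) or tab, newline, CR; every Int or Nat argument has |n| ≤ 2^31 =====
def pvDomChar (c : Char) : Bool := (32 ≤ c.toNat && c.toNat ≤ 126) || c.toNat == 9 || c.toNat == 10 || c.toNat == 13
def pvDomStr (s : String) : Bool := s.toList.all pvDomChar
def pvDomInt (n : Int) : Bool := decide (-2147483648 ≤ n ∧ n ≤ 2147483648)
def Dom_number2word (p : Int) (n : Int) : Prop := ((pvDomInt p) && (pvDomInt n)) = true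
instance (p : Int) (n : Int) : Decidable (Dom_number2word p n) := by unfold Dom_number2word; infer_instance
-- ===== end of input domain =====

-- B replaces A's inner loop (which rebuilds sum(26**i for i in range(k)) from scratch each
-- outer iteration) by the closed form (26**n-1)//25 computed once and updated incrementally.

-- ===== PORT A =====
-- inner 'for i in range(1, k+1): num_pal_let += 26**(i-1)'
def pvAInner (k : Int) : Int :=
  (PySem.List.pyRange 1 (k + 1) 1).foldl (fun acc i => acc + 26 ^ (i - 1).toNat) 0

-- 'while k > 1: …' ; chr(x) ported as Char.ofNat x.toNat (exact on Pre_, where 0 ≤ x and x is a Unicode scalar)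
def pvALoop (num k : Int) (word : String) : String :=
  if _h : 1 < k then
    let num_pal_let := pvAInner k
    if PySem.Int.mod num num_pal_let = 0 then
      word.push (Char.ofNat (PySem.Int.floordiv num num_pal_let + 97).toNat)   -- break
    else
      pvALoop (PySem.Int.mod num num_pal_let - 1) (k - 1)
        (word.push (Char.ofNat (PySem.Int.floordiv num num_pal_let + 97).toNat))
  else if k = 1 then word.push (Char.ofNat (num + 97).toNat)
  else word
termination_by k.toNat
decreasing_by omega

def number2word (p : Int) (n : Int) : String := pvALoop (p - 1) n ""

-- ===== PORT B =====
def pvBLoop (num s k : Int) (out : List Char) : String :=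
  if _h : 1 < k then
    let q := PySem.Int.floordiv num s
    let r := PySem.Int.mod num s
    let out' := out ++ [Char.ofNat (q + 97).toNat]
    if r = 0 then String.ofList out'
    else pvBLoop (r - 1) (PySem.Int.floordiv (s - 1) 26) (k - 1) out'
  else String.ofList (out ++ [Char.ofNat (num + 97).toNat])
termination_by k.toNat
decreasing_by omega

def number2word_alt (p : Int) (n : Int) : String :=
  if n ≤ 0 then ""
  else pvBLoop (p - 1) (PySem.Int.floordiv (26 ^ n.toNat - 1) 25) n []

-- ===== PRECONDITION & SPEC =====
-- chr argument must be a Unicode scalar value (0..0xD7FF or 0xE000..0x10FFFF)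
def pvOkChr (x : Int) : Bool := (0 ≤ x && x ≤ 55295) || (57344 ≤ x && x ≤ 1114111)

-- Only the FIRST letter's chr argument (p-1)//blk + 97 (blk = sum(26**i for i in range(n)))
-- can raise or leave the scalar range: after the first step num lies in [-1, blk-2], so every
-- later quotient is in [-1, 25] and every later chr argument is in [96, 122].
-- The branch '7 ≤ n → accept' is NOT a cap: for n ≥ 7 the block size (26^7-1)/25 > 3·10^8
-- already exceeds 2^31/97, so on Dom (|p| ≤ 2^31) the first quotient lies in [-7, 6] and the
-- chr argument in [90, 103] — always a valid scalar; the branch only avoids evaluating the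
-- astronomically large 26^n when deciding Pre_ for big n.
def pvPreB (p : Int) (n : Int) : Bool :=
  if n ≤ 0 then true
  else if 7 ≤ n then true
  else pvOkChr (PySem.Int.floordiv (p - 1) ((26 ^ n.toNat - 1) / 25) + 97)

-- Pre_ excludes exactly the inputs where A raises ValueError (a chr argument that is negative
-- or above 0x10FFFF) and the narrow bands where the first chr argument is a UTF-16 surrogate
-- 0xD800..0xDFFF: there Python A (and B identically) return a one-character lone-surrogate
-- string that is not a representable Lean Char, so the value cannot be stated here.
def Pre_number2word (p : Int) (n : Int) : Prop := pvPreB p n = true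
instance (p : Int) (n : Int) : Decidable (Pre_number2word p n) := by
  unfold Pre_number2word; infer_instance

def pvWitness_number2word : Int × Int := (703, 2)

def Spec_number2word (p : Int) (n : Int) (out : String) : Prop := out = number2word_alt p n
instance (p : Int) (n : Int) (out : String) : Decidable (Spec_number2word p n out) := by
  unfold Spec_number2word; infer_instance

-- ===== CLAIM (what is proved, stated in full; the proofs are below) =====
def Claim_equal_number2word : Prop :=
  ∀ (p : Int) (n : Int), Dom_number2word p n → Pre_number2word p n →
    Spec_number2word p n (number2word p n)

-- ===== LEMMAS AND PROOFS =====

-- sum_{i=1}^{m} 26^(i-1), as a recurrence from the back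
def pvGeom : Nat → Int
  | 0 => 0
  | m + 1 => pvGeom m + 26 ^ m

theorem pvGeom_closed (m : Nat) : 25 * pvGeom m + 1 = 26 ^ m := by
  induction m with
  | zero => simp [pvGeom]
  | succ m ih => simp only [pvGeom]; linear_combination ih

theorem pvGeom_front (m : Nat) : pvGeom (m + 1) = 1 + 26 * pvGeom m := by
  have h1 := pvGeom_closed (m + 1)
  have h2 := pvGeom_closed m
  have h3 : (26 : Int) ^ (m + 1) = 26 * 26 ^ m := by ring
  linarith

theorem pvAInner_nat (m : Nat) : pvAInner (m : Int) = pvGeom m := by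
  induction m with
  | zero =>
    simp [pvAInner, PySem.List.pyRange_one_eq_nil (by norm_num : (1:Int) ≥ 1), pvGeom]
  | succ m ih =>
    unfold pvAInner at ih ⊢
    have hcast : ((m + 1 : Nat) : Int) + 1 = ((m : Int) + 1) + 1 := by push_cast; ring
    rw [hcast, PySem.List.pyRange_one_succ_right (by omega : (1:Int) ≤ (m : Int) + 1),
        List.foldl_append, ih]
    simp [pvGeom]

theorem pvAInner_eq (k : Int) : pvAInner k = pvGeom k.toNat := by
  by_cases hk : 0 ≤ k
  · lift k to ℕ using hk
    simp [pvAInner_nat]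
  · have h0 : k.toNat = 0 := by omega
    unfold pvAInner
    rw [PySem.List.pyRange_one_eq_nil (by omega : k + 1 ≤ 1), h0]
    simp [pvGeom]

theorem pvB_init (n : Int) :
    PySem.Int.floordiv (26 ^ n.toNat - 1) 25 = pvGeom n.toNat := by
  have h := pvGeom_closed n.toNat
  have : (26 : Int) ^ n.toNat - 1 = 25 * pvGeom n.toNat := by omega
  rw [this, PySem.Int.floordiv_eq_ediv_of_pos (by norm_num)]
  exact Int.mul_ediv_cancel_left _ (by norm_num)

theorem pvS_step (m : Nat) :
    PySem.Int.floordiv (pvGeom (m + 1) - 1) 26 = pvGeom m := by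
  have h := pvGeom_front m
  have : pvGeom (m + 1) - 1 = 26 * pvGeom m := by omega
  rw [this, PySem.Int.floordiv_eq_ediv_of_pos (by norm_num)]
  exact Int.mul_ediv_cancel_left _ (by norm_num)

theorem pvPush_mk (cs : List Char) (c : Char) :
    (String.ofList cs).push c = String.ofList (cs ++ [c]) := by
  rw [← String.toList_inj, String.toList_push, String.toList_ofList, String.toList_ofList]

theorem pvLoop_eq (m : Nat) : ∀ (k num : Int) (cs : List Char), k.toNat = m → 1 ≤ k →
    pvALoop num k (String.ofList cs) = pvBLoop num (pvGeom k.toNat) k cs := by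
  induction m with
  | zero => intro k num cs hm hk; omega
  | succ m ih =>
    intro k num cs hm hk
    by_cases hk1 : 1 < k
    · rw [pvALoop, pvBLoop]
      simp only [hk1, dif_pos, pvAInner_eq]
      by_cases hr : PySem.Int.mod num (pvGeom k.toNat) = 0
      · simp only [hr, if_pos, pvPush_mk]
      · simp only [hr, if_neg, not_false_iff, pvPush_mk]
        have hkt : k.toNat = (k - 1).toNat + 1 := by omega
        have hstep : PySem.Int.floordiv (pvGeom k.toNat - 1) 26 = pvGeom (k - 1).toNat := by
          rw [hkt]; exact pvS_step _
        rw [hstep, ih (k - 1) _ _ (by omega) (by omega)]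
    · have hk1' : k = 1 := by omega
      subst hk1'
      rw [pvALoop, pvBLoop]
      simp [pvPush_mk]

-- ===== VERDICT (by name: the statement is the Claim_ definition above) =====
theorem number2word_spec : Claim_equal_number2word := by
  intro p n _ _
  unfold Spec_number2word number2word number2word_alt
  by_cases hn : n ≤ 0
  · simp only [hn, if_pos]
    rw [pvALoop]
    have h1 : ¬ (1 : Int) < n := by omega
    have h2 : n ≠ 1 := by omega
    simp [h1, h2]
  · simp only [hn, if_neg, not_false_iff]
    rw [pvB_init]
    have : ("" : String) = String.ofList [] := rfl
    rw [this, pvLoop_eq n.toNat n (p - 1) [] rfl (by omega)]
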